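-- pv_equiv track=rewrite | github.com/aws-samples/sample-amazon-connect-outbound-call | lambdas/StartCallRecording/EBMLUtils.py | readDataSignedInteger
-- ===== SOURCE A (Python) =====
-- EBML_SIZE_MAX_BTYES = 8
--
-- BYTE_SIZE = 8
--
-- def readDataSignedInteger(byteBuffer, size):
--     if not (size >= 0 and size <= EBML_SIZE_MAX_BTYES):
--         raise ValueError(f"Asked for a numeric value of invalid size {size}")
--
--     value = 0
--     for i in range(size):
--         result = byteBuffer.pop(0) & 0xFF
--         if i == 0:
--             positive = (result & 0x80) == 0
--             if not positive:
--                 value = -1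
--
--         value = (value << BYTE_SIZE) | result
--
--     return value
-- ===== SOURCE B (Python) =====
-- EBML_SIZE_MAX_BTYES = 8
--
-- BYTE_SIZE = 8
--
-- def readDataSignedInteger(byteBuffer, size):
--     if not (size >= 0 and size <= EBML_SIZE_MAX_BTYES):
--         raise ValueError(f"Asked for a numeric value of invalid size {size}")
--
--     buf = bytearray()
--     for _ in range(size):
--         buf.append(byteBuffer.pop(0) & 0xFF)
--
--     return int.from_bytes(bytes(buf), 'big', signed=True)
-- ===== Notes on version B (the rewrite author's own statement) =====
-- stated objective: idiomatic
-- what changed: B pops the size bytes (masked with & 0xFF) into a bytearray and converts once with int.from_bytes(..., 'big', signed=True), replacing A's explicit shift/OR accumulation loop and its value=-1 sign-extension trick.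
import Mathlib
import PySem

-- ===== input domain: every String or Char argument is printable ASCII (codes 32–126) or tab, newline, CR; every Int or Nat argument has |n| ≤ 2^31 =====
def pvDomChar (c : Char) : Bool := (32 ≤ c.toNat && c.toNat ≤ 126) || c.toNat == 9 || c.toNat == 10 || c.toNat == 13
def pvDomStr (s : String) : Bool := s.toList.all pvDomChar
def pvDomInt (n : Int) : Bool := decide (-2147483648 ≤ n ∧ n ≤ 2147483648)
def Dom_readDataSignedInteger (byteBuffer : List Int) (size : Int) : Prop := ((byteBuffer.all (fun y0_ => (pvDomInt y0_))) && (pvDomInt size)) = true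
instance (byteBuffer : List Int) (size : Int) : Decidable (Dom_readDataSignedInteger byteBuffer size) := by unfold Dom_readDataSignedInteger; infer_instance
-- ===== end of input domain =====

-- B replaces A's shift/OR accumulation and value = -1 sign-extension trick by collecting the
-- masked bytes and converting once with int.from_bytes(..., 'big', signed=True) (objective:
-- idiomatic). Both A and B pop the first `size` elements off byteBuffer; the equivalence
-- proved here is about the return value (the mutation is identical in both).

-- ===== PORT A =====
-- loop body of A: pop the front byte, mask it, sign-extend on the first iteration, shift/OR it in
def aBody (st : List Int × Int) (i : Int) : List Int × Int :=
  match st with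
  | (buf, value) =>
    match buf with
    | [] => ([], value)  -- byteBuffer.pop(0) raises IndexError here; excluded by Pre_
    | b :: rest =>
      let result := PySem.Int.band b 255
      let value := if i = 0 then (if PySem.Int.band result 128 = 0 then value else -1) else value
      (rest, PySem.Int.bor (value <<< (8:Nat)) result)

def readDataSignedInteger (byteBuffer : List Int) (size : Int) : Int :=
  if ¬ (size ≥ 0 ∧ size ≤ 8) then 0  -- raise ValueError; excluded by Pre_
  else ((PySem.List.pyRange 0 size 1).foldl aBody (byteBuffer, 0)).2

-- ===== PORT B =====
-- loop body of B: pop the front byte and append its masked value to the collected bytes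
def bBody (st : List Int × List Int) (_i : Int) : List Int × List Int :=
  match st with
  | (buf, acc) =>
    match buf with
    | [] => ([], acc)  -- byteBuffer.pop(0) raises IndexError here; excluded by Pre_
    | b :: rest => (rest, acc ++ [PySem.Int.band b 255])

-- int.from_bytes(bs, 'big', signed=True): hand port of the stdlib call, exact for byte lists
-- (each element in [0, 256))
def fromBytesBigSigned (bs : List Int) : Int :=
  let u := bs.foldl (fun acc b => acc * 256 + b) 0
  if bs ≠ [] ∧ 2 ^ (8 * bs.length) ≤ 2 * u then u - 2 ^ (8 * bs.length) else u

def readDataSignedInteger_alt (byteBuffer : List Int) (size : Int) : Int :=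
  if ¬ (size ≥ 0 ∧ size ≤ 8) then 0  -- raise ValueError; excluded by Pre_
  else fromBytesBigSigned (((PySem.List.pyRange 0 size 1).foldl bBody (byteBuffer, [])).2)

-- ===== PRECONDITION & SPEC =====
-- Pre_ excludes exactly the inputs where the Python A raises: ValueError when size is outside
-- [0, 8], IndexError (pop from empty list) when byteBuffer has fewer than size elements.
def Pre_readDataSignedInteger (byteBuffer : List Int) (size : Int) : Prop :=
  0 ≤ size ∧ size ≤ 8 ∧ size ≤ (byteBuffer.length : Int)
instance (byteBuffer : List Int) (size : Int) : Decidable (Pre_readDataSignedInteger byteBuffer size) := by unfold Pre_readDataSignedInteger; infer_instance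

def pvWitness_readDataSignedInteger : List Int × Int := ([255, 1, 7], 2)

def Spec_readDataSignedInteger (byteBuffer : List Int) (size : Int) (out : Int) : Prop := out = readDataSignedInteger_alt byteBuffer size
instance (byteBuffer : List Int) (size : Int) (out : Int) : Decidable (Spec_readDataSignedInteger byteBuffer size out) := by unfold Spec_readDataSignedInteger; infer_instance

-- ===== CLAIM (what is proved, stated in full; the proofs are below) =====
def Claim_equal_readDataSignedInteger : Prop := ∀ (byteBuffer : List Int) (size : Int), Dom_readDataSignedInteger byteBuffer size → Pre_readDataSignedInteger byteBuffer size → Spec_readDataSignedInteger byteBuffer size (readDataSignedInteger byteBuffer size)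

-- ===== LEMMAS AND PROOFS =====

-- the masked byte b & 0xFF lies in [0, 256)
lemma mask_bounds (b : Int) : 0 ≤ PySem.Int.band b 255 ∧ PySem.Int.band b 255 < 256 := by
  unfold PySem.Int.band
  split_ifs with h1 h2 h2
  · refine ⟨Int.natCast_nonneg _, ?_⟩
    have : b.toNat &&& 255 = b.toNat % 256 := Nat.and_two_pow_sub_one_eq_mod b.toNat 8
    rw [show ((255:Int).toNat) = 255 from rfl, this]
    exact_mod_cast Nat.mod_lt _ (by norm_num)
  · omega
  · refine ⟨Int.natCast_nonneg _, ?_⟩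
    have : (255:Int).toNat - ((255:Int).toNat &&& (-b - 1).toNat) ≤ 255 := by omega
    exact_mod_cast lt_of_le_of_lt this (by norm_num)
  · omega

-- a number whose low 8 bits are all ones absorbs a byte under &&&
lemma mask_and_eq (c m : Nat) (hc : c % 256 = 255) (hm : m < 256) : c &&& m = m := by
  have h255 : ∀ x : Nat, x &&& 255 = x % 256 := by
    intro x
    have := Nat.and_two_pow_sub_one_eq_mod x 8
    norm_num at this
    exact this
  have hm' : m &&& 255 = m := by rw [h255]; omega
  calc c &&& m = c &&& (m &&& 255) := by rw [hm']
    _ = c &&& (255 &&& m) := by rw [Nat.and_comm m 255]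
    _ = (c &&& 255) &&& m := by rw [Nat.and_assoc]
    _ = 255 &&& m := by rw [h255, hc]
    _ = m := by rw [Nat.and_comm, hm']

-- (v * 256) | m = v * 256 + m for a byte m, any integer v (Python two's-complement semantics)
lemma bor_shift (v m : Int) (h0 : 0 ≤ m) (h1 : m < 256) :
    PySem.Int.bor (v * 256) m = v * 256 + m := by
  unfold PySem.Int.bor
  rw [if_pos h0]
  split_ifs with ha
  · have hv : 0 ≤ v := by nlinarith
    have ht : (v * 256).toNat = v.toNat * 256 := by
      rw [Int.toNat_mul hv (by norm_num : (0:Int) ≤ 256)]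
      rfl
    rw [ht]
    have hor : v.toNat * 256 ||| m.toNat = v.toNat * 256 + m.toNat := by
      have := Nat.shiftLeft_add_eq_or_of_lt (show m.toNat < 2 ^ 8 by omega) v.toNat
      rw [Nat.shiftLeft_eq] at this
      norm_num at this ⊢
      omega
    rw [hor]
    push_cast
    rw [Int.toNat_of_nonneg hv, Int.toNat_of_nonneg h0]
  · have hv : v < 0 := by
      by_contra h
      exact ha (mul_nonneg (by omega) (by norm_num))
    have hv256 : v * 256 ≤ -256 := by
      have := mul_le_mul_of_nonneg_right (show v ≤ -1 by omega) (show (0:Int) ≤ 256 by norm_num)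
      linarith
    have hcInt : ((-(v * 256) - 1).toNat : Int) = -(v * 256) - 1 := Int.toNat_of_nonneg (by omega)
    have hcmod : (-(v * 256) - 1).toNat % 256 = 255 := by
      have h2 : -(v * 256) - 1 = (-v - 1) * 256 + 255 := by ring
      have h3 : ((-(v * 256) - 1).toNat : Int) % 256 = 255 := by
        rw [hcInt, h2]
        omega
      omega
    have hand := mask_and_eq _ m.toNat hcmod (by omega)
    rw [hand]
    have hle : m.toNat ≤ (-(v * 256) - 1).toNat := by omega
    omega

-- the sign test: m & 0x80 == 0 iff m < 128, for a byte m
lemma band128 (m : Int) (h0 : 0 ≤ m) (h1 : m < 256) :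
    (PySem.Int.band m 128 = 0) ↔ m < 128 := by
  unfold PySem.Int.band
  rw [if_pos h0, if_pos (by norm_num : (0:Int) ≤ 128)]
  have h2 : m.toNat < 256 := by omega
  have e : m.toNat &&& (128:Int).toNat = (m.toNat.testBit 7).toNat * 2 ^ 7 := by
    rw [show ((128:Int).toNat) = 2 ^ 7 from rfl]
    exact Nat.and_two_pow m.toNat 7
  rw [e, Nat.toNat_testBit]
  have h3 : m.toNat / 2 ^ 7 % 2 = m.toNat / 128 % 2 := rfl
  rw [h3]
  norm_num
  omega

-- big-endian accumulation from an arbitrary seed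
lemma foldl_shift (ms : List Int) (v : Int) :
    ms.foldl (fun a m => a * 256 + m) v
      = v * 256 ^ ms.length + ms.foldl (fun a m => a * 256 + m) 0 := by
  induction ms generalizing v with
  | nil => simp
  | cons m ms ih =>
    simp only [List.foldl_cons, List.length_cons]
    rw [ih (v * 256 + m), ih (0 * 256 + m)]
    ring

-- bounds on the unsigned big-endian value of a byte list
lemma unsigned_bounds (ms : List Int) (h : ∀ m ∈ ms, 0 ≤ m ∧ m < 256) :
    0 ≤ ms.foldl (fun a m => a * 256 + m) 0 ∧
      ms.foldl (fun a m => a * 256 + m) 0 < 256 ^ ms.length := by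
  induction ms with
  | nil => simp
  | cons m ms ih =>
    obtain ⟨h1, h2⟩ := ih (fun x hx => h x (List.mem_cons_of_mem _ hx))
    obtain ⟨hm1, hm2⟩ := h m (List.mem_cons_self ..)
    simp only [List.foldl_cons, List.length_cons]
    rw [foldl_shift]
    have hp : (0:Int) < 256 ^ ms.length := by positivity
    constructor
    · nlinarith
    · rw [pow_succ']
      nlinarith

-- B's loop collects the masked first xs.length bytes; the index values are irrelevant
lemma bLoop (xs : List Int) (rest acc l : List Int) (h : l.length = xs.length) :
    l.foldl bBody (xs ++ rest, acc) = (rest, acc ++ xs.map (fun b => PySem.Int.band b 255)) := by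
  induction xs generalizing l acc with
  | nil =>
    cases l with
    | nil => simp
    | cons i l' => simp at h
  | cons b xs ih =>
    cases l with
    | nil => simp at h
    | cons i l' =>
      simp only [List.length_cons] at h
      simp only [List.cons_append, List.foldl_cons, bBody]
      rw [ih (acc ++ [PySem.Int.band b 255]) l' (by omega)]
      simp

-- A's loop after the first iteration: pure big-endian accumulation (indices all nonzero)
lemma aLoopTail (xs : List Int) (rest l : List Int) (v : Int)
    (h : l.length = xs.length) (hnz : ∀ i ∈ l, i ≠ 0) :
    l.foldl aBody (xs ++ rest, v)
      = (rest, (xs.map (fun b => PySem.Int.band b 255)).foldl (fun a m => a * 256 + m) v) := by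
  induction xs generalizing l v with
  | nil =>
    cases l with
    | nil => simp
    | cons i l' => simp at h
  | cons b xs ih =>
    cases l with
    | nil => simp at h
    | cons i l' =>
      simp only [List.length_cons] at h
      have hi : i ≠ 0 := hnz i (List.mem_cons_self ..)
      simp only [List.cons_append, List.foldl_cons, aBody, if_neg hi]
      rw [show (v <<< (8:Nat)) = v * 256 from by rw [Int.shiftLeft_eq]; norm_num]
      rw [bor_shift v _ (mask_bounds b).1 (mask_bounds b).2]
      rw [ih l' (v * 256 + PySem.Int.band b 255) (by omega)
          (fun j hj => hnz j (List.mem_cons_of_mem _ hj))]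
      simp

-- assembling: A's signed value equals int.from_bytes of the masked bytes
lemma final (m0 : Int) (ms' : List Int) (hm0 : 0 ≤ m0 ∧ m0 < 256)
    (hms : ∀ m ∈ ms', 0 ≤ m ∧ m < 256) :
    ((if PySem.Int.band m0 128 = 0 then (0:Int) else -1) * 256 + m0) * 256 ^ ms'.length
        + ms'.foldl (fun a m => a * 256 + m) 0
      = fromBytesBigSigned (m0 :: ms') := by
  unfold fromBytesBigSigned
  simp only [List.foldl_cons, List.length_cons, zero_mul, zero_add]
  rw [foldl_shift ms' m0]
  set U : Int := ms'.foldl (fun a m => a * 256 + m) 0 with hU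
  set k : Nat := ms'.length with hk
  obtain ⟨hU0, hU1⟩ := unsigned_bounds ms' hms
  rw [← hk] at hU1
  have hP : (0:Int) < 256 ^ k := by positivity
  have hpow : (2:Int) ^ (8 * (k + 1)) = 256 ^ k * 256 := by
    rw [pow_mul]
    norm_num
    rw [pow_succ]
  rw [hpow]
  simp only [band128 m0 hm0.1 hm0.2]
  rw [← hU] at hU0 hU1
  by_cases hb : m0 < 128
  · rw [if_pos hb, if_neg]
    · ring
    · rintro ⟨-, hle⟩
      nlinarith
  · rw [if_neg hb, if_pos ⟨by simp, by nlinarith [show (128:Int) ≤ m0 by omega]⟩]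
    ring

-- ===== VERDICT (by name: the statement is the Claim_ definition above) =====
theorem readDataSignedInteger_spec : Claim_equal_readDataSignedInteger := by
  intro byteBuffer size hdom hpre
  obtain ⟨h0, h8, hlen⟩ := hpre
  unfold Spec_readDataSignedInteger readDataSignedInteger readDataSignedInteger_alt
  rw [if_neg (show ¬¬(size ≥ 0 ∧ size ≤ 8) from by omega),
      if_neg (show ¬¬(size ≥ 0 ∧ size ≤ 8) from by omega)]
  have hsz : size = ((size.toNat : Nat) : Int) := by omega
  set n : Nat := size.toNat with hn
  rw [hsz] at hlen ⊢
  obtain ⟨xs, rest, hbb, hlx⟩ :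
      ∃ xs rest, byteBuffer = xs ++ rest ∧ xs.length = n :=
    ⟨byteBuffer.take n, byteBuffer.drop n, (List.take_append_drop n byteBuffer).symm,
      by rw [List.length_take]; omega⟩
  subst hbb
  have hB : (PySem.List.pyRange 0 (n : Int) 1).foldl bBody (xs ++ rest, []) =
      (rest, xs.map (fun b => PySem.Int.band b 255)) := by
    have := bLoop xs rest [] (PySem.List.pyRange 0 (n : Int) 1)
      (by rw [PySem.List.length_pyRange_one]; omega)
    simpa using this
  rw [hB]
  cases xs with
  | nil =>
    have hn0 : (n : Int) ≤ 0 := by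
      simp at hlx
      omega
    rw [PySem.List.pyRange_one_eq_nil hn0]
    simp [fromBytesBigSigned]
  | cons b xs' =>
    simp only [List.length_cons] at hlx
    have hn1 : (0 : Int) < (n : Int) := by omega
    rw [PySem.List.pyRange_one_cons hn1]
    simp only [List.foldl_cons]
    have hstep : aBody ((b :: xs') ++ rest, 0) 0 =
        (xs' ++ rest,
          (if PySem.Int.band (PySem.Int.band b 255) 128 = 0 then (0:Int) else -1) * 256
            + PySem.Int.band b 255) := by
      simp only [aBody, List.cons_append]
      rw [show ∀ w : Int, (w <<< (8:Nat)) = w * 256 from fun w => by rw [Int.shiftLeft_eq]; norm_num]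
      split_ifs <;> rw [bor_shift _ _ (mask_bounds b).1 (mask_bounds b).2]
    rw [hstep]
    simp only [zero_add]
    rw [aLoopTail xs' rest (PySem.List.pyRange 1 (n : Int) 1) _
      (by rw [PySem.List.length_pyRange_one]; omega)
      (by
        intro i hi
        rw [PySem.List.mem_pyRange_one] at hi
        omega)]
    rw [foldl_shift]
    rw [final (PySem.Int.band b 255) (xs'.map (fun b => PySem.Int.band b 255))
      (mask_bounds b)
      (by
        intro m hm
        rw [List.mem_map] at hm
        obtain ⟨x, -, rfl⟩ := hm
        exact mask_bounds x)]
    simp
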